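-- pv_equiv track=rewrite | github.com/ClientUnknown/SimsThings | EA/core/sims4/importer/custom_import.py | _find_module_in_list
-- ===== SOURCE A (Python) =====
-- def _find_module_in_list(module_name, module_list):
--     name_list = module_name.split('.')
--     name_list_len = len(name_list)
--     for module_name in module_list:
--         ignore_list = module_name.split('.')
--         ignore = True
--         for i in range(len(ignore_list)):
--             if i < name_list_len and name_list[i] != ignore_list[i]:
--                 ignore = False
--                 break
--         if ignore:
--             return True
-- ===== SOURCE B (Python) =====
-- def _find_module_in_list(module_name, module_list):
--     name_prefix = module_name + '.'
--     for entry in module_list: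
--         if (module_name == entry
--                 or module_name.startswith(entry + '.')
--                 or entry.startswith(name_prefix)):
--             return True
-- ===== Notes on version B (the rewrite author's own statement) =====
-- stated objective: idiomatic
-- what changed: B drops the split-into-component-lists and the inner index loop entirely: each entry is tested with three direct string checks (equality, module_name.startswith(entry + '.'), entry.startswith(module_name + '.')), which is exactly the component-overlap condition A computes.
import Mathlib
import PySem

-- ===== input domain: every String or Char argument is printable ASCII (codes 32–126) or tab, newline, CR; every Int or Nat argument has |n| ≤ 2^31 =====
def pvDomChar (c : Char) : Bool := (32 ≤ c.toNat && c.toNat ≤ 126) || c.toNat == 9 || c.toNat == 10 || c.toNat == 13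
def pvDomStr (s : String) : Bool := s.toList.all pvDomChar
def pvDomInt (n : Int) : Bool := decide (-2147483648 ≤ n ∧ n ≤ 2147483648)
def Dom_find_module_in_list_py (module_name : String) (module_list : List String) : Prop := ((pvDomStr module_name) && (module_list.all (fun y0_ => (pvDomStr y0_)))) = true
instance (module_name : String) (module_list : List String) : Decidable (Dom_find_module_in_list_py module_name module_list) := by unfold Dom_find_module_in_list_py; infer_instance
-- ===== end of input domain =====

-- B replaces A's split-into-component-lists + inner index loop by three direct string
-- prefix/equality tests per entry (idiomatic; same asymptotic cost).

-- ===== PORT A =====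
-- inner loop 'for i in range(len(ignore_list)): if i < name_list_len and name_list[i] != ignore_list[i]: ignore = False; break'
def pvAIgnoreGo (ns : List (List Char)) (nlen : Nat) (es : List (List Char)) : List Int → Bool
  | [] => true
  | i :: rest =>
    if i < (nlen : Int) ∧ PySem.List.pyGetD ns i [] ≠ PySem.List.pyGetD es i [] then false
    else pvAIgnoreGo ns nlen es rest

-- outer loop 'for module_name in module_list: … if ignore: return True'
def pvAloop (ns : List (List Char)) (nlen : Nat) : List String → Option Bool
  | [] => none
  | m :: rest =>
    let ignore_list := PySem.Chars.splitOn m.toList ['.']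
    if pvAIgnoreGo ns nlen ignore_list (PySem.List.pyRange 0 (ignore_list.length : Int) 1) then some true
    else pvAloop ns nlen rest

-- str.split('.') is PySem.Chars.splitOn (the sep ≠ "" form) on the code points;
-- Python's str equality/inequality is equality of the code-point lists.
def find_module_in_list_py (module_name : String) (module_list : List String) : Option Bool :=
  let name_list := PySem.Chars.splitOn module_name.toList ['.']
  pvAloop name_list name_list.length module_list

-- ===== PORT B =====
-- '+ "."' is list append of the code points; startswith is PySem.Chars.startswith;
-- np is the hoisted 'name_prefix = module_name + "."'.
def pvBloop (n np : List Char) : List String → Option Bool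
  | [] => none
  | e :: rest =>
    let l := e.toList
    if n = l ∨ PySem.Chars.startswith n (l ++ ['.']) ∨ PySem.Chars.startswith l np then some true
    else pvBloop n np rest

def find_module_in_list_py_alt (module_name : String) (module_list : List String) : Option Bool :=
  pvBloop module_name.toList (module_name.toList ++ ['.']) module_list

-- ===== PRECONDITION & SPEC =====
def Spec_find_module_in_list_py (module_name : String) (module_list : List String) (out : Option Bool) : Prop := out = find_module_in_list_py_alt module_name module_list
instance (module_name : String) (module_list : List String) (out : Option Bool) : Decidable (Spec_find_module_in_list_py module_name module_list out) := by unfold Spec_find_module_in_list_py; infer_instance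

-- ===== CLAIM (what is proved, stated in full; the proofs are below) =====
def Claim_equal_find_module_in_list_py : Prop := ∀ (module_name : String) (module_list : List String), Dom_find_module_in_list_py module_name module_list → Spec_find_module_in_list_py module_name module_list (find_module_in_list_py module_name module_list)

-- ===== LEMMAS AND PROOFS =====

-- proof-side clean form of split-on-dot: (head piece, remaining pieces)
def splitP : List Char → List Char × List (List Char)
  | [] => ([], [])
  | c :: s =>
    let p := splitP s
    if c = '.' then ([], p.1 :: p.2) else (c :: p.1, p.2)

-- componentwise agreement on the overlap (A's inner-loop result, structurally)
def overlapB : List (List Char) → List (List Char) → Bool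
  | _, [] => true
  | [], _ :: _ => true
  | a :: as, b :: bs => (a = b) && overlapB as bs

lemma overlapB_nil_left (t : List (List Char)) : overlapB [] t = true := by
  cases t <;> rfl

lemma splitOn_go_eq (fuel : Nat) (l cur : List Char) (acc : List (List Char))
    (h : l.length ≤ fuel) :
    PySem.Chars.splitOn.go ['.'] fuel l cur acc
      = acc.reverse ++ (cur.reverse ++ (splitP l).1) :: (splitP l).2 := by
  induction fuel generalizing l cur acc with
  | zero =>
    have : l = [] := List.eq_nil_of_length_eq_zero (Nat.le_zero.mp h)
    subst this
    simp [PySem.Chars.splitOn.go, splitP]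
  | succ fuel ih =>
    cases l with
    | nil => simp [PySem.Chars.splitOn.go, splitP]
    | cons c rest =>
      by_cases hc : c = '.'
      · subst hc
        have : PySem.Chars.splitOn.go ['.'] (fuel+1) ('.' :: rest) cur acc
            = PySem.Chars.splitOn.go ['.'] fuel rest [] (cur.reverse :: acc) := by
          simp [PySem.Chars.splitOn.go, List.isPrefixOf]
        rw [this, ih rest [] (cur.reverse :: acc) (by simpa using Nat.lt_succ_iff.mp (by simpa using h))]
        simp [splitP]
      · have : PySem.Chars.splitOn.go ['.'] (fuel+1) (c :: rest) cur acc
            = PySem.Chars.splitOn.go ['.'] fuel rest (c :: cur) acc := by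
          simp [PySem.Chars.splitOn.go, List.isPrefixOf, Ne.symm hc]
        rw [this, ih rest (c :: cur) acc (by simpa using Nat.lt_succ_iff.mp (by simpa using h))]
        simp [splitP, hc]

lemma splitOn_eq (s : List Char) :
    PySem.Chars.splitOn s ['.'] = (splitP s).1 :: (splitP s).2 := by
  have := splitOn_go_eq (s.length + 1) s [] [] (by omega)
  simpa [PySem.Chars.splitOn] using this

-- A's inner loop computes the componentwise overlap agreement
lemma ignoreGo_eq (ns es : List (List Char)) (k : Nat) (hk : k ≤ es.length) :
    pvAIgnoreGo ns ns.length es (PySem.List.pyRange (k : Int) (es.length : Int) 1)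
      = overlapB (ns.drop k) (es.drop k) := by
  induction hn : es.length - k generalizing k with
  | zero =>
    have hk' : k = es.length := by omega
    subst hk'
    rw [PySem.List.pyRange_one_eq_nil (by omega)]
    simp [pvAIgnoreGo, List.drop_eq_nil_of_le (le_refl es.length)]
    cases h : ns.drop es.length <;> simp [overlapB]
  | succ m ih =>
    have hklt : k < es.length := by omega
    rw [PySem.List.pyRange_one_cons (by exact_mod_cast hklt)]
    have hes : es.drop k = es[k] :: es.drop (k+1) := List.drop_eq_getElem_cons hklt
    by_cases hlt : k < ns.length
    · have hns : ns.drop k = ns[k] :: ns.drop (k+1) := List.drop_eq_getElem_cons hlt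
      have g1 : PySem.List.pyGetD ns (k : Int) [] = ns[k] :=
        PySem.List.pyGetD_ofNat ns k [] hlt
      have g2 : PySem.List.pyGetD es (k : Int) [] = es[k] :=
        PySem.List.pyGetD_ofNat es k [] hklt
      by_cases heq : ns[k] = es[k]
      · have : pvAIgnoreGo ns ns.length es ((k : Int) :: PySem.List.pyRange ((k : Int) + 1) (es.length : Int) 1)
            = pvAIgnoreGo ns ns.length es (PySem.List.pyRange ((k : Int) + 1) (es.length : Int) 1) := by
          simp [pvAIgnoreGo, g1, g2, heq]
        rw [this]
        have := ih (k+1) (by omega) (by omega)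
        rw [hes, hns]
        simpa [overlapB, heq] using this
      · have : pvAIgnoreGo ns ns.length es ((k : Int) :: PySem.List.pyRange ((k : Int) + 1) (es.length : Int) 1)
            = false := by
          simp [pvAIgnoreGo, g1, g2, heq]
          omega
        rw [this, hes, hns]
        simp [overlapB, heq]
    · have hns : ns.drop k = [] := List.drop_eq_nil_of_le (by omega)
      have : pvAIgnoreGo ns ns.length es ((k : Int) :: PySem.List.pyRange ((k : Int) + 1) (es.length : Int) 1)
          = pvAIgnoreGo ns ns.length es (PySem.List.pyRange ((k : Int) + 1) (es.length : Int) 1) := by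
        have : ¬ ((k : Int) < (ns.length : Int)) := by exact_mod_cast hlt
        simp [pvAIgnoreGo, this]
      rw [this]
      have := ih (k+1) (by omega) (by omega)
      rw [hns, hes]
      have hns2 : ns.drop (k+1) = [] := List.drop_eq_nil_of_le (by omega)
      rw [hns2] at this
      simpa [overlapB, overlapB_nil_left] using this

-- startswith strips a common head character
lemma startswith_cons (c : Char) (s p : List Char) :
    PySem.Chars.startswith (c :: s) (c :: p) = PySem.Chars.startswith s p := by
  simp [PySem.Chars.startswith, List.isPrefixOf]

-- the heart: componentwise overlap of the dot-splits = B's three string tests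
lemma overlap_splitP (n e : List Char) :
    overlapB ((splitP n).1 :: (splitP n).2) ((splitP e).1 :: (splitP e).2)
      = ((n = e : Bool) || PySem.Chars.startswith n (e ++ ['.']) || PySem.Chars.startswith e (n ++ ['.'])) := by
  induction n generalizing e with
  | nil =>
    cases e with
    | nil => simp [splitP, overlapB, PySem.Chars.startswith]
    | cons d e' =>
      by_cases hd : d = '.'
      · subst hd
        simp [splitP, overlapB, overlapB_nil_left, PySem.Chars.startswith, List.isPrefixOf]
      · simp [splitP, hd, overlapB, PySem.Chars.startswith, List.isPrefixOf, Ne.symm hd]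
  | cons c n' ih =>
    cases e with
    | nil =>
      by_cases hc : c = '.'
      · subst hc
        simp [splitP, overlapB, PySem.Chars.startswith, List.isPrefixOf]
      · simp [splitP, hc, overlapB, PySem.Chars.startswith, List.isPrefixOf, Ne.symm hc]
    | cons d e' =>
      by_cases hc : c = '.' <;> by_cases hd : d = '.'
      · subst hc; subst hd
        have := ih e'
        simp only [splitP]
        simp only [overlapB]
        simp only [List.cons_append, startswith_cons]
        simpa [overlapB] using this
      · subst hc
        simp [splitP, hd, overlapB, PySem.Chars.startswith, List.isPrefixOf, Ne.symm hd]
      · subst hd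
        simp [splitP, hc, overlapB, PySem.Chars.startswith, List.isPrefixOf, Ne.symm hc]
      · by_cases hcd : c = d
        · subst hcd
          have hIH := ih e'
          simp only [splitP, if_neg hc]
          simp only [overlapB]
          simp only [List.cons_append, startswith_cons]
          have hcons : (decide ((c :: n' : List Char) = c :: e')) = (decide (n' = e')) := by simp
          rw [hcons, ← hIH]
          simp [overlapB]
        · simp [splitP, hc, hd, overlapB, PySem.Chars.startswith, List.isPrefixOf, hcd,
            Ne.symm hcd]

-- per-entry: A's ignore flag equals B's test
lemma entry_eq (n e : List Char) :
    pvAIgnoreGo (PySem.Chars.splitOn n ['.']) (PySem.Chars.splitOn n ['.']).length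
        (PySem.Chars.splitOn e ['.'])
        (PySem.List.pyRange 0 ((PySem.Chars.splitOn e ['.']).length : Int) 1)
      = ((n = e : Bool) || PySem.Chars.startswith n (e ++ ['.']) || PySem.Chars.startswith e (n ++ ['.'])) := by
  have h0 : ((0 : Int)) = ((0 : Nat) : Int) := rfl
  rw [h0, ignoreGo_eq _ _ 0 (Nat.zero_le _)]
  simp only [List.drop_zero]
  rw [splitOn_eq, splitOn_eq]
  exact overlap_splitP n e

lemma loops_eq (n : List Char) (xs : List String) :
    pvAloop (PySem.Chars.splitOn n ['.']) (PySem.Chars.splitOn n ['.']).length xs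
      = pvBloop n (n ++ ['.']) xs := by
  induction xs with
  | nil => rfl
  | cons e rest ih =>
    simp only [pvAloop, pvBloop]
    rw [entry_eq n e.toList]
    by_cases h : n = e.toList ∨ PySem.Chars.startswith n (e.toList ++ ['.']) ∨ PySem.Chars.startswith e.toList (n ++ ['.'])
    · have : ((n = e.toList : Bool) || PySem.Chars.startswith n (e.toList ++ ['.']) || PySem.Chars.startswith e.toList (n ++ ['.'])) = true := by
        rcases h with h | h | h <;> simp [h]
      simp [this, h]
    · have : ((n = e.toList : Bool) || PySem.Chars.startswith n (e.toList ++ ['.']) || PySem.Chars.startswith e.toList (n ++ ['.'])) = false := by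
        push Not at h
        simp [h.1, h.2.1, h.2.2]
      simp [this, h, ih]

-- ===== VERDICT (by name: the statement is the Claim_ definition above) =====
theorem find_module_in_list_py_spec : Claim_equal_find_module_in_list_py := by
  intro module_name module_list _
  unfold Spec_find_module_in_list_py find_module_in_list_py find_module_in_list_py_alt
  exact loops_eq module_name.toList module_list
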